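-- pv_equiv track=rewrite | github.com/nischal07-create/ProductionProject | backend/trips/views.py | _build_balanced_day_stops
-- ===== SOURCE A (Python) =====
-- def _build_balanced_day_stops(places, days, max_stops_per_day=2):
--     """Distribute places into day buckets with practical stop caps and category variety."""
--     if days <= 0:
--         return []
--
--     day_stops = [[] for _ in range(days)]
--     remaining = list(places)
--
--     # First pass: give each day one unique stop when possible.
--     for day_index in range(days):
--         if not remaining:
--             break
--         day_stops[day_index].append(remaining.pop(0))
--
--     # Second pass: fill up to max_stops_per_day while preferring new categories per day.
--     while remaining:
--         progress = False
--         for day_index in range(days):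
--             if not remaining:
--                 break
--             if len(day_stops[day_index]) >= max_stops_per_day:
--                 continue
--
--             used_categories = {stop.get("category") for stop in day_stops[day_index]}
--             pick_index = next(
--                 (
--                     idx
--                     for idx, candidate in enumerate(remaining)
--                     if candidate.get("category") not in used_categories
--                 ),
--                 0,
--             )
--             day_stops[day_index].append(remaining.pop(pick_index))
--             progress = True
--
--         if not progress:
--             break
--
--     return day_stops
-- ===== SOURCE B (Python) =====
-- def _build_balanced_day_stops(places, days, max_stops_per_day=2):
--     """Distribute places into day buckets with practical stop caps and category variety."""
--     if days <= 0:
--         return []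
--
--     items = list(places)
--     k = min(days, len(items))
--     # Seed each day with one stop by slicing; keep each day's category set incrementally.
--     buckets = [[p] for p in items[:k]] + [[] for _ in range(days - k)]
--     used = [{p.get("category")} for p in items[:k]] + [set() for _ in range(days - k)]
--
--     # Category-indexed queues over the leftover places: each queue holds
--     # (original position, place) in order.  A pick is the minimum over queue
--     # heads (restricted to categories the day has not seen, else over all),
--     # so no scan of a 'remaining' list is ever needed; exhausted queues are
--     # simply skipped.
--     queues = {}
--     for pos, p in enumerate(items[k:]):
--         queues.setdefault(p.get("category"), []).append((pos, p))
--     remaining = len(items) - k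
--
--     while remaining:
--         open_days = [d for d in range(days) if len(buckets[d]) < max_stops_per_day]
--         if not open_days:
--             break
--         for d in open_days:
--             if not remaining:
--                 break
--             best_fresh = best_any = None
--             for cat, q in queues.items():
--                 if not q:
--                     continue
--                 head = q[0][0]
--                 if best_any is None or head < best_any[0]:
--                     best_any = (head, cat)
--                 if cat not in used[d] and (best_fresh is None or head < best_fresh[0]):
--                     best_fresh = (head, cat)
--             cat = (best_fresh or best_any)[1]
--             _, p = queues[cat].pop(0)
--             buckets[d].append(p)
--             used[d].add(p.get("category"))
--             remaining -= 1
--     return buckets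
-- ===== Notes on version B (the rewrite author's own statement) =====
-- stated objective: alternative
-- what changed: B replaces A's linear scan of the remaining list on every pick by category-indexed queues built once: a pick is the minimum over queue heads (restricted to unseen categories, else over all), no remaining list is kept (only a count), days are seeded by slicing instead of pop(0), and each round iterates a precomputed open-day list instead of scanning all days with a progress flag.
import Mathlib
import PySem

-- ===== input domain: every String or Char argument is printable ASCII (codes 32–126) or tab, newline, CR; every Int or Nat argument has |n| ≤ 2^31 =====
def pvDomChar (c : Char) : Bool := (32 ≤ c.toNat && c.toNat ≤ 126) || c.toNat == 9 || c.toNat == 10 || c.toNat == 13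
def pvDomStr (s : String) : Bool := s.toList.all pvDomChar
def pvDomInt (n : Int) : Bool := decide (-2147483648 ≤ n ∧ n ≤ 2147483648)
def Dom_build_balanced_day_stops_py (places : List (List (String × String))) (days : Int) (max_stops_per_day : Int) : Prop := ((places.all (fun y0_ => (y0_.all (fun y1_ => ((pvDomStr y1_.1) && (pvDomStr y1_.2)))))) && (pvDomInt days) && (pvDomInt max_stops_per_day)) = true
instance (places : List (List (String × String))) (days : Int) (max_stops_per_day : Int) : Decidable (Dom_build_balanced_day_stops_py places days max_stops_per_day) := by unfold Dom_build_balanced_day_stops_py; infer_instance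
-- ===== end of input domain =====

-- B replaces A's per-pick linear scan of the remaining list by category-indexed queues built once
-- (a pick = minimum over queue heads, restricted to categories the day has not seen, else over all;
-- only a count of remaining places is kept), seeds the days by slicing instead of pop(0), and drives
-- each round by a precomputed open-day list instead of scanning all days with a progress flag.
-- Objective: alternative. Return values only; neither implementation mutates its arguments.

-- ===== PORT A =====
-- stop.get("category") on the assoc-list encoding of a dict: first match (shared by both ports)
def pvGetCat (s : List (String × String)) : Option String :=
  (s.find? (fun p => p.1 == "category")).map (·.2)

-- first pass: for day_index in range(days): if not remaining: break; day_stops[day_index].append(remaining.pop(0))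
def pvAFirst : List Nat → List (List (List (String × String))) → List (List (String × String)) →
    (List (List (List (String × String))) × List (List (String × String)))
  | [], ds, rem => (ds, rem)
  | i :: is, ds, rem =>
    match rem with
    | [] => (ds, rem)
    | p :: rest => pvAFirst is (ds.set i (ds.getD i [] ++ [p])) rest

-- pick_index = next((idx for idx, c in enumerate(remaining) if c.get("category") not in used), 0)
def pvAPick (used : PySem.Set (Option String)) (rem : List (List (String × String))) : Nat :=
  match rem.findIdx? (fun c => !(PySem.Set.contains used (pvGetCat c))) with
  | some j => j
  | none => 0

-- inner 'for day_index in range(days)' of the second pass; state = (day_stops, remaining, progress)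
def pvAInner (mx : Int) : List Nat →
    (List (List (List (String × String))) × List (List (String × String)) × Bool) →
    (List (List (List (String × String))) × List (List (String × String)) × Bool)
  | [], st => st
  | i :: is, (ds, rem, prog) =>
    if rem = [] then (ds, rem, prog)          -- break
    else if mx ≤ ((ds.getD i []).length : Int) then pvAInner mx is (ds, rem, prog)  -- continue
    else
      let b := ds.getD i []
      let used := PySem.Set.ofList (b.map (fun s => pvGetCat s))
      let j := pvAPick used rem
      match PySem.List.pop? rem (j : Int) with
      | some (x, rest) => pvAInner mx is (ds.set i (b ++ [x]), rest, true)
      | none => pvAInner mx is (ds, rem, prog)  -- unreachable: pick index is always in range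

-- while remaining: … if not progress: break   (fuel = len(remaining)+1 rounds always suffices:
-- every continuing round pops at least one element)
def pvAWhile (mx : Int) (daysN : Nat) : Nat → List (List (List (String × String))) →
    List (List (String × String)) → List (List (List (String × String)))
  | 0, ds, _ => ds
  | fuel + 1, ds, rem =>
    if rem = [] then ds
    else
      let r := pvAInner mx (List.range daysN) (ds, rem, false)
      if r.2.2 then pvAWhile mx daysN fuel r.1 r.2.1 else r.1

def build_balanced_day_stops_py (places : List (List (String × String))) (days : Int) (max_stops_per_day : Int) : List (List (List (String × String))) :=
  if days ≤ 0 then []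
  else
    let r := pvAFirst (List.range days.toNat) (List.replicate days.toNat []) places
    pvAWhile max_stops_per_day days.toNat (r.2.length + 1) r.1 r.2

-- ===== PORT B =====
-- queues: dict category -> list of (original position, place); built once over enumerate(items[k:])
def pvBQueues (rest : List (List (String × String))) :
    PySem.Dict (Option String) (List (Int × List (String × String))) :=
  (PySem.List.enumerate rest).foldl
    (fun q e => q.modify (pvGetCat e.2) [] (· ++ [e])) PySem.Dict.empty

-- best = best if (best is not None and best[0] <= head) else (head, cat)
def pvUpd (b : Option (Int × Option String)) (h : Int) (c : Option String) :
    Option (Int × Option String) :=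
  match b with
  | none => some (h, c)
  | some m => if h < m.1 then some (h, c) else b

-- the 'for cat, q in queues.items()' scan accumulating best_fresh and best_any
def pvBScan (u : PySem.Set (Option String)) :
    List (Option String × List (Int × List (String × String))) →
    Option (Int × Option String) → Option (Int × Option String) →
    Option (Int × Option String) × Option (Int × Option String)
  | [], bf, ba => (bf, ba)
  | (c, q) :: rest, bf, ba =>
    match q with
    | [] => pvBScan u rest bf ba               -- if not q: continue
    | (h, _) :: _ =>
      pvBScan u rest (if PySem.Set.contains u c then bf else pvUpd bf h c) (pvUpd ba h c)

-- 'for d in open_days' body; state = (buckets, used-sets, queues, remaining count)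
def pvBInner (mx : Int) : List Nat →
    (List (List (List (String × String))) × List (PySem.Set (Option String)) ×
      PySem.Dict (Option String) (List (Int × List (String × String))) × Int) →
    (List (List (List (String × String))) × List (PySem.Set (Option String)) ×
      PySem.Dict (Option String) (List (Int × List (String × String))) × Int)
  | [], st => st
  | d :: dsl, (bk, us, qs, rem) =>
    if rem = 0 then (bk, us, qs, rem)          -- if not remaining: break
    else
      let ud := us.getD d PySem.Set.empty
      let r := pvBScan ud qs.items none none
      match (match r.1 with | some b => some b | none => r.2) with   -- best_fresh or best_any
      | none => (bk, us, qs, rem)              -- unreachable: remaining > 0 means a nonempty queue exists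
      | some (_, c) =>
        match qs.getD c [] with
        | [] => (bk, us, qs, rem)              -- unreachable: the chosen queue is nonempty
        | (_, p) :: qrest =>
          pvBInner mx dsl
            (bk.set d (bk.getD d [] ++ [p]), us.set d (PySem.Set.add ud (pvGetCat p)),
             qs.insert c qrest, rem - 1)

-- while remaining: open_days = [d for d in range(days) if len(buckets[d]) < max]; if not open_days: break; …
def pvBWhile (mx : Int) (daysN : Nat) : Nat →
    (List (List (List (String × String))) × List (PySem.Set (Option String)) ×
      PySem.Dict (Option String) (List (Int × List (String × String))) × Int) →
    List (List (List (String × String)))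
  | 0, (bk, _, _, _) => bk
  | fuel + 1, (bk, us, qs, rem) =>
    if rem = 0 then bk
    else
      let od := (List.range daysN).filter (fun d => ((bk.getD d []).length : Int) < mx)
      if od = [] then bk
      else pvBWhile mx daysN fuel (pvBInner mx od (bk, us, qs, rem))

def build_balanced_day_stops_py_alt (places : List (List (String × String))) (days : Int) (max_stops_per_day : Int) : List (List (List (String × String))) :=
  if days ≤ 0 then []
  else
    let k := min days.toNat places.length
    let buckets := (places.take k).map (fun p => [p]) ++ List.replicate (days.toNat - k) []
    let used := (places.take k).map (fun p => PySem.Set.ofList [pvGetCat p]) ++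
                List.replicate (days.toNat - k) PySem.Set.empty
    let rest := places.drop k
    pvBWhile max_stops_per_day days.toNat (rest.length + 1)
      (buckets, used, pvBQueues rest, (rest.length : Int))

-- ===== PRECONDITION & SPEC =====
def Spec_build_balanced_day_stops_py (places : List (List (String × String))) (days : Int) (max_stops_per_day : Int) (out : List (List (List (String × String)))) : Prop := out = build_balanced_day_stops_py_alt places days max_stops_per_day
instance (places : List (List (String × String))) (days : Int) (max_stops_per_day : Int) (out : List (List (List (String × String)))) : Decidable (Spec_build_balanced_day_stops_py places days max_stops_per_day out) := by unfold Spec_build_balanced_day_stops_py; infer_instance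

-- ===== CLAIM (what is proved, stated in full; the proofs are below) =====
def Claim_equal_build_balanced_day_stops_py : Prop := ∀ (places : List (List (String × String))) (days : Int) (max_stops_per_day : Int), Dom_build_balanced_day_stops_py places days max_stops_per_day → Spec_build_balanced_day_stops_py places days max_stops_per_day (build_balanced_day_stops_py places days max_stops_per_day)

-- ===== LEMMAS AND PROOFS =====

-- the category set A rebuilds for a bucket (proof-only abbreviation)
def pvCatSet (b : List (List (String × String))) : PySem.Set (Option String) :=
  PySem.Set.ofList (b.map (fun s => pvGetCat s))

-- 'candidate is fresh for the day' predicate, on an (index, place) pair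
def pvFresh (u : PySem.Set (Option String)) (e : Int × List (String × String)) : Bool :=
  !(PySem.Set.contains u (pvGetCat e.2))

-- the invariant linking B's queue dictionary to the (indexed) remaining list E
def pvQInv (qs : PySem.Dict (Option String) (List (Int × List (String × String))))
    (E : List (Int × List (String × String))) : Prop :=
  qs.keys.Nodup ∧
  (∀ c, qs.getD c [] = E.filter (fun e => pvGetCat e.2 == c)) ∧
  (∀ e ∈ E, qs.contains (pvGetCat e.2) = true)

theorem pvCatSet_append (b : List (List (String × String))) (x : List (String × String)) :
    pvCatSet (b ++ [x]) = PySem.Set.add (pvCatSet b) (pvGetCat x) := by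
  simp [pvCatSet, PySem.Set.ofList_eq_foldl, List.foldl_append]

theorem pvGetD_map_catSet (ds : List (List (List (String × String)))) (i : Nat) :
    (ds.map pvCatSet).getD i PySem.Set.empty = pvCatSet (ds.getD i []) := by
  simp only [List.getD_eq_getElem?_getD, List.getElem?_map]
  cases ds[i]? <;> rfl

theorem pvGetD_set_ne (l : List (List (List (String × String)))) (i j : Nat) (x : List (List (String × String))) (h : i ≠ j) :
    (l.set i x).getD j [] = l.getD j [] := by
  simp only [List.getD_eq_getElem?_getD, List.getElem?_set_ne h]

-- ----- the scan computes fold-minima over the head lists -----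
def pvAllHeads (P : List (Option String × List (Int × List (String × String)))) :
    List (Int × Option String) :=
  P.filterMap (fun cq => cq.2.head?.map (fun h => (h.1, cq.1)))

def pvFreshHeads (u : PySem.Set (Option String))
    (P : List (Option String × List (Int × List (String × String)))) :
    List (Int × Option String) :=
  P.filterMap (fun cq =>
    if PySem.Set.contains u cq.1 then none else cq.2.head?.map (fun h => (h.1, cq.1)))

theorem pvBScan_eq_foldl (u : PySem.Set (Option String)) :
    ∀ P bf ba, pvBScan u P bf ba =
      ((pvFreshHeads u P).foldl (fun b x => pvUpd b x.1 x.2) bf,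
       (pvAllHeads P).foldl (fun b x => pvUpd b x.1 x.2) ba) := by
  intro P
  induction P with
  | nil => intro bf ba; rfl
  | cons cq rest ih =>
    intro bf ba
    obtain ⟨c, q⟩ := cq
    cases q with
    | nil => simp [pvBScan, pvAllHeads, pvFreshHeads, ih]
    | cons h t =>
      by_cases hc : c ∈ u
      · simp [pvBScan, pvAllHeads, pvFreshHeads, hc, ih]
      · simp [pvBScan, pvAllHeads, pvFreshHeads, hc, ih]

-- fold-min characterisation: the result is a member (or the start) and a lower bound
theorem pvFoldMin_spec :
    ∀ (xs : List (Int × Option String)) (b : Option (Int × Option String)) (mm : Int × Option String),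
      xs.foldl (fun b x => pvUpd b x.1 x.2) b = some mm →
      (mm ∈ xs ∨ b = some mm) ∧ (∀ x ∈ xs, mm.1 ≤ x.1) ∧
        (∀ v, b = some v → mm.1 ≤ v.1) := by
  intro xs
  induction xs with
  | nil =>
    intro b mm h
    simp only [List.foldl_nil] at h
    exact ⟨Or.inr h, by simp, fun v hv => by rw [h] at hv; cases hv; exact le_refl _⟩
  | cons x xs ih =>
    intro b mm h
    rw [List.foldl_cons] at h
    obtain ⟨h1, h2, h3⟩ := ih (pvUpd b x.1 x.2) mm h
    have hw : ∃ w, pvUpd b x.1 x.2 = some w ∧ w.1 ≤ x.1 ∧ (∀ v, b = some v → w.1 ≤ v.1) ∧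
        (w = x ∨ b = some w) := by
      cases b with
      | none => exact ⟨x, rfl, le_refl _, by simp, Or.inl rfl⟩
      | some m =>
        by_cases hlt : x.1 < m.1
        · exact ⟨x, by simp [pvUpd, hlt], le_refl _,
            fun v hv => by cases hv; exact le_of_lt hlt, Or.inl rfl⟩
        · exact ⟨m, by simp [pvUpd, hlt], le_of_not_gt hlt,
            fun v hv => by cases hv; exact le_refl _, Or.inr rfl⟩
    obtain ⟨w, hw1, hw2, hw3, hw4⟩ := hw
    have hmw : mm.1 ≤ w.1 := h3 w hw1
    refine ⟨?_, ?_, ?_⟩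
    · rcases h1 with h1 | h1
      · exact Or.inl (List.mem_cons_of_mem _ h1)
      · rw [hw1] at h1; cases h1
        rcases hw4 with h4 | h4
        · exact Or.inl (h4 ▸ List.mem_cons_self ..)
        · exact Or.inr h4
    · intro y hy
      rcases List.mem_cons.mp hy with rfl | hy
      · exact le_trans hmw hw2
      · exact h2 y hy
    · intro v hv
      exact le_trans hmw (hw3 v hv)

theorem pvFoldMin_isSome (xs : List (Int × Option String)) :
    ∀ (b : Option (Int × Option String)), (xs ≠ [] ∨ b ≠ none) →
      xs.foldl (fun b x => pvUpd b x.1 x.2) b ≠ none := by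
  induction xs with
  | nil =>
    intro b h
    rcases h with h | h
    · exact absurd rfl h
    · exact h
  | cons x xs ih =>
    intro b _
    rw [List.foldl_cons]
    refine ih _ (Or.inr ?_)
    cases b with
    | none => simp [pvUpd]
    | some m => by_cases hlt : x.1 < m.1 <;> simp [pvUpd, hlt]

-- ----- facts about the queue dictionary under the invariant -----
theorem pvEntry_filter {qs : PySem.Dict (Option String) (List (Int × List (String × String)))}
    {E : List (Int × List (String × String))} (hq : pvQInv qs E)
    {c : Option String} {q : List (Int × List (String × String))} (h : (c, q) ∈ qs.items) :
    q = E.filter (fun e => pvGetCat e.2 == c) := by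
  have := PySem.Dict.getD_of_mem_items qs h hq.1 []
  rw [← this, hq.2.1 c]

theorem pvEntry_mem {qs : PySem.Dict (Option String) (List (Int × List (String × String)))}
    {E : List (Int × List (String × String))} (hq : pvQInv qs E)
    {c : Option String} (h : qs.contains c = true) :
    (c, E.filter (fun e => pvGetCat e.2 == c)) ∈ qs.items := by
  cases hg : qs.get? c with
  | none => rw [PySem.Dict.get?_eq_none_iff_contains] at hg; rw [h] at hg; cases hg
  | some v =>
    have hv : v = E.filter (fun e => pvGetCat e.2 == c) := by
      have := PySem.Dict.getD_eq_get?_getD qs c []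
      rw [hg, hq.2.1 c] at this
      exact this.symm
    exact hv ▸ PySem.Dict.mem_items_of_get?_eq_some qs hg

theorem pvFstInj {α : Type} {E : List (Int × α)} (hp : E.Pairwise (fun a b => a.1 < b.1))
    {a b : Int × α} (ha : a ∈ E) (hb : b ∈ E) (h : a.1 = b.1) : a = b := by
  have hm : (E.map (·.1)).Pairwise (· < ·) := List.pairwise_map.mpr hp
  exact List.inj_on_of_nodup_map (List.Pairwise.imp ne_of_lt hm) ha hb h

theorem pvMem_allHeads {qs : PySem.Dict (Option String) (List (Int × List (String × String)))}
    {E : List (Int × List (String × String))} (hq : pvQInv qs E)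
    {x : Int × Option String} (hx : x ∈ pvAllHeads qs.items) :
    ∃ h ∈ E, x = (h.1, pvGetCat h.2) := by
  obtain ⟨cq, hmem, hfx⟩ := List.mem_filterMap.mp hx
  obtain ⟨c, q⟩ := cq
  cases hh : q.head? with
  | none => rw [hh] at hfx; cases hfx
  | some h =>
    rw [hh] at hfx
    simp only [Option.map_some, Option.some.injEq] at hfx
    have hfil := pvEntry_filter hq hmem
    have hhm : h ∈ q := List.mem_of_mem_head? hh
    rw [hfil] at hhm
    have := List.mem_filter.mp hhm
    refine ⟨h, this.1, ?_⟩
    rw [← hfx]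
    have hc : pvGetCat h.2 = c := by
      have := this.2; simpa using this
    rw [hc]

theorem pvMem_freshHeads {u : PySem.Set (Option String)}
    {qs : PySem.Dict (Option String) (List (Int × List (String × String)))}
    {E : List (Int × List (String × String))} (hq : pvQInv qs E)
    {x : Int × Option String} (hx : x ∈ pvFreshHeads u qs.items) :
    ∃ h ∈ E, x = (h.1, pvGetCat h.2) ∧ pvFresh u h = true := by
  obtain ⟨cq, hmem, hfx⟩ := List.mem_filterMap.mp hx
  obtain ⟨c, q⟩ := cq
  by_cases hc : PySem.Set.contains u c
  · rw [if_pos hc] at hfx; cases hfx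
  · rw [if_neg hc] at hfx
    cases hh : q.head? with
    | none => rw [hh] at hfx; cases hfx
    | some h =>
      rw [hh] at hfx
      simp only [Option.map_some, Option.some.injEq] at hfx
      have hfil := pvEntry_filter hq hmem
      have hhm : h ∈ q := List.mem_of_mem_head? hh
      rw [hfil] at hhm
      have := List.mem_filter.mp hhm
      have hcat : pvGetCat h.2 = c := by have := this.2; simpa using this
      refine ⟨h, this.1, ?_, ?_⟩
      · rw [← hfx, hcat]
      · simp only [pvFresh, hcat]
        simp only [Bool.not_eq_true'] at hc ⊢
        exact eq_false_of_ne_true hc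

-- identification of the fold-min with a known minimal element
theorem pvFoldMin_eq {E : List (Int × List (String × String))}
    (hp : E.Pairwise (fun a b => a.1 < b.1))
    (xs : List (Int × Option String)) (e : Int × List (String × String)) (he : e ∈ E)
    (hmem : (e.1, pvGetCat e.2) ∈ xs)
    (hxs : ∀ x ∈ xs, ∃ h ∈ E, x = (h.1, pvGetCat h.2) ∧ e.1 ≤ h.1) :
    xs.foldl (fun b x => pvUpd b x.1 x.2) none = some (e.1, pvGetCat e.2) := by
  cases hres : xs.foldl (fun b x => pvUpd b x.1 x.2) none with
  | none =>
    exact absurd hres (pvFoldMin_isSome xs none (Or.inl (List.ne_nil_of_mem hmem)))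
  | some mm =>
    obtain ⟨h1, h2, _⟩ := pvFoldMin_spec xs none mm hres
    have hmm : mm ∈ xs := by rcases h1 with h1 | h1; exact h1; cases h1
    obtain ⟨h, hhE, hxe, hle⟩ := hxs mm hmm
    have hub : mm.1 ≤ e.1 := h2 _ hmem
    have hhe : h.1 = e.1 := by
      rw [hxe] at hub
      exact le_antisymm hub hle
    have heq : h = e := pvFstInj hp hhE he hhe
    rw [hxe, heq]

-- best_any = (index, category) of the earliest remaining place
theorem pvScan_any {qs : PySem.Dict (Option String) (List (Int × List (String × String)))}
    {e0 : Int × List (String × String)} {rest0 : List (Int × List (String × String))}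
    (hq : pvQInv qs (e0 :: rest0)) (hp : (e0 :: rest0).Pairwise (fun a b => a.1 < b.1)) :
    (pvAllHeads qs.items).foldl (fun b x => pvUpd b x.1 x.2) none = some (e0.1, pvGetCat e0.2) := by
  have he0 : e0 ∈ e0 :: rest0 := List.mem_cons_self ..
  refine pvFoldMin_eq hp _ e0 he0 ?_ ?_
  · -- (e0.1, cat e0) is the head of its own category's queue
    have hcont := hq.2.2 e0 he0
    have hent := pvEntry_mem hq hcont
    refine List.mem_filterMap.mpr ⟨_, hent, ?_⟩
    have hfil : (e0 :: rest0).filter (fun e => pvGetCat e.2 == pvGetCat e0.2) =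
        e0 :: rest0.filter (fun e => pvGetCat e.2 == pvGetCat e0.2) := by
      rw [List.filter_cons_of_pos (by simp)]
    rw [hfil]
    rfl
  · intro x hx
    obtain ⟨h, hhE, hxe⟩ := pvMem_allHeads hq hx
    refine ⟨h, hhE, hxe, ?_⟩
    rcases List.mem_cons.mp hhE with rfl | hh
    · exact le_refl _
    · exact le_of_lt ((List.pairwise_cons.mp hp).1 h hh)

-- best_fresh = none exactly when no remaining place has a fresh category
theorem pvScan_fresh_none {u : PySem.Set (Option String)}
    {qs : PySem.Dict (Option String) (List (Int × List (String × String)))}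
    {E : List (Int × List (String × String))} (hq : pvQInv qs E)
    (hF : E.find? (pvFresh u) = none) :
    (pvFreshHeads u qs.items).foldl (fun b x => pvUpd b x.1 x.2) none = none := by
  have hnil : pvFreshHeads u qs.items = [] := by
    rw [pvFreshHeads, List.filterMap_eq_nil_iff]
    intro cq hmem
    by_cases hc : PySem.Set.contains u cq.1
    · rw [if_pos hc]
    · rw [if_neg hc]
      have hfil : cq.2 = E.filter (fun e => pvGetCat e.2 == cq.1) := pvEntry_filter hq (by
        obtain ⟨c, q⟩ := cq; exact hmem)
      cases hh : cq.2.head? with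
      | none => rfl
      | some h =>
        exfalso
        have hhm : h ∈ cq.2 := List.mem_of_mem_head? hh
        rw [hfil] at hhm
        have hm := List.mem_filter.mp hhm
        have hcat : pvGetCat h.2 = cq.1 := by have := hm.2; simpa using this
        have : ¬ pvFresh u h = true := by
          rw [List.find?_eq_none] at hF
          exact hF h hm.1
        apply this
        simp only [pvFresh, hcat]
        simp only [Bool.not_eq_true'] at hc ⊢
        exact eq_false_of_ne_true hc
  rw [hnil]
  rfl

-- best_fresh = (index, category) of the earliest remaining place with a fresh category
theorem pvScan_fresh_some {u : PySem.Set (Option String)}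
    {qs : PySem.Dict (Option String) (List (Int × List (String × String)))}
    {E : List (Int × List (String × String))} (hq : pvQInv qs E)
    (hp : E.Pairwise (fun a b => a.1 < b.1))
    {e : Int × List (String × String)} (hF : E.find? (pvFresh u) = some e) :
    (pvFreshHeads u qs.items).foldl (fun b x => pvUpd b x.1 x.2) none = some (e.1, pvGetCat e.2) := by
  obtain ⟨hfr, as, bs, hEeq, has⟩ := List.find?_eq_some_iff_append.mp hF
  have hcontu : PySem.Set.contains u (pvGetCat e.2) = false := by
    simpa [pvFresh] using hfr
  have heE : e ∈ E := by rw [hEeq]; exact List.mem_append_right _ (List.mem_cons_self ..)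
  have hfilas : as.filter (fun x => pvGetCat x.2 == pvGetCat e.2) = [] := by
    rw [List.filter_eq_nil_iff]
    intro a ha hcat
    have hcat' : pvGetCat a.2 = pvGetCat e.2 := by simpa using hcat
    have hfa : pvFresh u a = true := by
      have hnm : pvGetCat e.2 ∉ u := by simpa using hcontu
      simp [pvFresh, hcat', hnm]
    have := has a ha
    rw [hfa] at this
    simp at this
  have hfilE : E.filter (fun x => pvGetCat x.2 == pvGetCat e.2) =
      e :: bs.filter (fun x => pvGetCat x.2 == pvGetCat e.2) := by
    rw [hEeq, List.filter_append, hfilas, List.filter_cons_of_pos (by simp), List.nil_append]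
  refine pvFoldMin_eq hp _ e heE ?_ ?_
  · have hcont := hq.2.2 e heE
    have hent := pvEntry_mem hq hcont
    refine List.mem_filterMap.mpr ⟨_, hent, ?_⟩
    rw [if_neg (by rw [hcontu]; exact Bool.false_ne_true), hfilE]
    rfl
  · intro x hx
    obtain ⟨h, hhE, hxe, hfh⟩ := pvMem_freshHeads hq hx
    refine ⟨h, hhE, hxe, ?_⟩
    have hnotas : h ∉ as := by
      intro hin
      have := has h hin
      rw [hfh] at this
      cases this
    have hin : h ∈ e :: bs := by
      rw [hEeq] at hhE
      rcases List.mem_append.mp hhE with h1 | h1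
      · exact absurd h1 hnotas
      · exact h1
    have hpeb : (e :: bs).Pairwise (fun a b => a.1 < b.1) := by
      refine List.Pairwise.sublist ?_ hp
      rw [hEeq]
      exact List.sublist_append_right _ _
    rcases List.mem_cons.mp hin with rfl | h1
    · exact le_refl _
    · exact le_of_lt ((List.pairwise_cons.mp hpeb).1 h h1)

-- ----- A's pick as an index into the decomposed remaining list -----
theorem pvFindIdx?_append {α : Type} (p : α → Bool) (as bs : List α) (e : α)
    (has : ∀ a ∈ as, p a = false) (he : p e = true) :
    (as ++ e :: bs).findIdx? p = some as.length := by
  induction as with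
  | nil => simp [List.findIdx?_cons, he]
  | cons a as ih =>
    rw [List.cons_append, List.findIdx?_cons, has a (List.mem_cons_self ..),
      ih (fun a ha => has a (List.mem_cons_of_mem _ ha))]
    rfl

theorem pvEraseIdx_append {α : Type} (as bs : List α) (e : α) :
    (as ++ e :: bs).eraseIdx as.length = as ++ bs := by
  induction as with
  | nil => rfl
  | cons a as ih => simpa [List.eraseIdx] using ih

theorem pvPop_append {α : Type} (as bs : List α) (e : α) :
    PySem.List.pop? (as ++ e :: bs) (as.length : Int) = some (e, as ++ bs) := by
  have h : as.length < (as ++ e :: bs).length := by simp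
  rw [PySem.List.pop?_natCast _ _ h, pvEraseIdx_append, List.getElem_of_append rfl rfl]

-- the queue invariant survives one pick (remove e = the head of its category's queue)
theorem pvQInv_step {qs : PySem.Dict (Option String) (List (Int × List (String × String)))}
    {as bs : List (Int × List (String × String))} {e : Int × List (String × String)}
    (hq : pvQInv qs (as ++ e :: bs)) :
    pvQInv (qs.insert (pvGetCat e.2)
        ((as ++ bs).filter (fun x => pvGetCat x.2 == pvGetCat e.2))) (as ++ bs) := by
  obtain ⟨hnd, hgetD, hcont⟩ := hq
  refine ⟨PySem.Dict.nodup_keys_insert _ _ _ hnd, ?_, ?_⟩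
  · intro c
    rw [PySem.Dict.getD_insert]
    by_cases hc : c = pvGetCat e.2
    · rw [if_pos hc, hc]
    · rw [if_neg hc, hgetD c]
      have hne : (pvGetCat e.2 == c) = false := beq_false_of_ne (Ne.symm hc)
      simp [List.filter_append, hne]
  · intro x hx
    rw [PySem.Dict.contains_insert]
    have hxE : x ∈ as ++ e :: bs := by
      rcases List.mem_append.mp hx with h | h
      · exact List.mem_append_left _ h
      · exact List.mem_append_right _ (List.mem_cons_of_mem _ h)
    rw [hcont x hxE, Bool.or_true]

-- one pick: A's index-based pop and B's min-over-queue-heads choose the SAME place,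
-- and the updated queue dictionary again satisfies the invariant for the new remaining list
theorem pvStep_corr {u : PySem.Set (Option String)}
    {qs : PySem.Dict (Option String) (List (Int × List (String × String)))}
    {E : List (Int × List (String × String))} (hq : pvQInv qs E)
    (hp : E.Pairwise (fun a b => a.1 < b.1))
    {e0 : Int × List (String × String)} {rest0 : List (Int × List (String × String))}
    (hE : E = e0 :: rest0) :
    ∃ (j : Nat) (e : Int × List (String × String)),
      pvAPick u (E.map (·.2)) = j ∧
      PySem.List.pop? (E.map (·.2)) (j : Int) = some (e.2, (E.eraseIdx j).map (·.2)) ∧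
      (match (pvBScan u qs.items none none).1 with
        | some b => some b
        | none => (pvBScan u qs.items none none).2) = some (e.1, pvGetCat e.2) ∧
      qs.getD (pvGetCat e.2) [] =
        e :: (E.eraseIdx j).filter (fun x => pvGetCat x.2 == pvGetCat e.2) ∧
      pvQInv (qs.insert (pvGetCat e.2)
        ((E.eraseIdx j).filter (fun x => pvGetCat x.2 == pvGetCat e.2))) (E.eraseIdx j) ∧
      (E.eraseIdx j).Pairwise (fun a b => a.1 < b.1) ∧
      (E.eraseIdx j).length + 1 = E.length := by
  -- obtain a decomposition E = as ++ e :: bs around the picked element e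
  obtain ⟨as, bs, e, hEeq, hfilas, hj, hscan⟩ :
      ∃ as bs e, E = as ++ e :: bs ∧
        as.filter (fun x => pvGetCat x.2 == pvGetCat e.2) = [] ∧
        pvAPick u (E.map (·.2)) = as.length ∧
        (match (pvBScan u qs.items none none).1 with
          | some b => some b
          | none => (pvBScan u qs.items none none).2) = some (e.1, pvGetCat e.2) := by
    cases hF : E.find? (pvFresh u) with
    | some e =>
      obtain ⟨hfr, as, bs, hEeq, has⟩ := List.find?_eq_some_iff_append.mp hF
      have hcontu : PySem.Set.contains u (pvGetCat e.2) = false := by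
        simpa [pvFresh] using hfr
      refine ⟨as, bs, e, hEeq, ?_, ?_, ?_⟩
      · rw [List.filter_eq_nil_iff]
        intro a ha hcat
        have hcat' : pvGetCat a.2 = pvGetCat e.2 := by simpa using hcat
        have hfa : pvFresh u a = true := by
          have hnm : pvGetCat e.2 ∉ u := by simpa using hcontu
          simp [pvFresh, hcat', hnm]
        have := has a ha
        rw [hfa] at this
        simp at this
      · rw [pvAPick, List.findIdx?_map]
        have hcomp : ((fun c => !(PySem.Set.contains u (pvGetCat c))) ∘ (·.2)) = pvFresh u :=
          rfl
        rw [hcomp, hEeq, pvFindIdx?_append (pvFresh u) as bs e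
          (fun a ha => by have := has a ha; simpa using this) hfr]
      · rw [pvBScan_eq_foldl]
        simp only [pvScan_fresh_some hq hp hF]
    | none =>
      refine ⟨[], rest0, e0, hE, by simp, ?_, ?_⟩
      · rw [pvAPick, List.findIdx?_map]
        have hcomp : ((fun c => !(PySem.Set.contains u (pvGetCat c))) ∘ (·.2)) = pvFresh u :=
          rfl
        rw [hcomp, List.findIdx?_eq_none_iff.mpr (by
          intro x hx
          have := List.find?_eq_none.mp hF x hx
          exact eq_false_of_ne_true this)]
        rfl
      · rw [pvBScan_eq_foldl]
        simp only [pvScan_fresh_none hq hF]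
        rw [hE] at hq hp
        simp only [pvScan_any hq hp]
  subst hEeq
  refine ⟨as.length, e, hj, ?_, hscan, ?_, ?_, ?_, ?_⟩
  · rw [pvEraseIdx_append]
    simpa using pvPop_append (as.map (·.2)) (bs.map (·.2)) e.2
  · rw [hq.2.1, pvEraseIdx_append, List.filter_append, List.filter_append, hfilas,
      List.filter_cons_of_pos (by simp)]
    simp
  · rw [pvEraseIdx_append]
    exact pvQInv_step hq
  · rw [pvEraseIdx_append]
    exact List.Pairwise.sublist ((List.sublist_cons_self e bs).append_left as) hp
  · rw [pvEraseIdx_append]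
    simp
    omega

-- ----- unfolding steps of the two inner loops -----
theorem pvAInner_break (mx : Int) (l : List Nat) (ds : List (List (List (String × String)))) (prog : Bool) :
    pvAInner mx l (ds, [], prog) = (ds, [], prog) := by
  cases l with
  | nil => rfl
  | cons i is => simp [pvAInner]

theorem pvBInner_break (mx : Int) (l : List Nat) (bk : List (List (List (String × String))))
    (us : List (PySem.Set (Option String)))
    (qs : PySem.Dict (Option String) (List (Int × List (String × String)))) :
    pvBInner mx l (bk, us, qs, 0) = (bk, us, qs, 0) := by
  cases l with
  | nil => rfl
  | cons d dsl => simp [pvBInner]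

theorem pvAInner_skip (mx : Int) (i : Nat) (is : List Nat) (ds : List (List (List (String × String))))
    (rem : List (List (String × String))) (prog : Bool) (hne : rem ≠ [])
    (hfull : mx ≤ ((ds.getD i []).length : Int)) :
    pvAInner mx (i :: is) (ds, rem, prog) = pvAInner mx is (ds, rem, prog) := by
  simp only [pvAInner]
  rw [if_neg hne, if_pos hfull]

theorem pvAInner_pick (mx : Int) (i : Nat) (is : List Nat) (ds : List (List (List (String × String))))
    (rem : List (List (String × String))) (prog : Bool) (hne : rem ≠ [])
    (hopen : ¬ mx ≤ ((ds.getD i []).length : Int))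
    (x : List (String × String)) (rest : List (List (String × String)))
    (hpop : PySem.List.pop? rem ((pvAPick (pvCatSet (ds.getD i [])) rem : Nat) : Int) = some (x, rest)) :
    pvAInner mx (i :: is) (ds, rem, prog) =
      pvAInner mx is (ds.set i (ds.getD i [] ++ [x]), rest, true) := by
  simp only [pvAInner]
  rw [if_neg hne, if_neg hopen]
  simp only [pvCatSet] at hpop
  simp only [hpop]

theorem pvBInner_pick (mx : Int) (d : Nat) (dsl : List Nat)
    (bk : List (List (List (String × String)))) (us : List (PySem.Set (Option String)))
    (qs : PySem.Dict (Option String) (List (Int × List (String × String)))) (rem : Int)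
    (hrem : ¬ rem = 0) (i0 : Int) (c : Option String)
    (hscan : (match (pvBScan (us.getD d PySem.Set.empty) qs.items none none).1 with
      | some b => some b
      | none => (pvBScan (us.getD d PySem.Set.empty) qs.items none none).2) = some (i0, c))
    (h0 : Int) (p : List (String × String)) (qrest : List (Int × List (String × String)))
    (hgetD : qs.getD c [] = (h0, p) :: qrest) :
    pvBInner mx (d :: dsl) (bk, us, qs, rem) =
      pvBInner mx dsl
        (bk.set d (bk.getD d [] ++ [p]),
         us.set d (PySem.Set.add (us.getD d PySem.Set.empty) (pvGetCat p)),
         qs.insert c qrest, rem - 1) := by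
  simp only [pvBInner]
  rw [if_neg hrem]
  simp only [hscan, hgetD]

-- B's inner loop over the precomputed open days mirrors A's inner loop over all days;
-- ds0 is the round-start day_stops (it determines open_days); the second hypothesis says A
-- has not yet touched the buckets of the days still to be processed.
theorem pvInner_corr (mx : Int) :
    ∀ (l : List Nat) (ds0 ds : List (List (List (String × String))))
      (E : List (Int × List (String × String)))
      (qs : PySem.Dict (Option String) (List (Int × List (String × String)))) (prog : Bool),
      l.Nodup → (∀ d ∈ l, ds.getD d [] = ds0.getD d []) → pvQInv qs E →
      E.Pairwise (fun a b => a.1 < b.1) →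
      ∃ E' qs', pvQInv qs' E' ∧ E'.Pairwise (fun a b => a.1 < b.1) ∧
        (pvAInner mx l (ds, E.map (·.2), prog)).2.1 = E'.map (·.2) ∧
        pvBInner mx (l.filter (fun d => ((ds0.getD d []).length : Int) < mx))
            (ds, ds.map pvCatSet, qs, (E.length : Int)) =
          ((pvAInner mx l (ds, E.map (·.2), prog)).1,
           (pvAInner mx l (ds, E.map (·.2), prog)).1.map pvCatSet, qs', (E'.length : Int)) ∧
        (pvAInner mx l (ds, E.map (·.2), prog)).2.2 =
          (prog || (decide (E ≠ []) &&
            decide ((l.filter (fun d => ((ds0.getD d []).length : Int) < mx)) ≠ []))) := by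
  intro l
  induction l with
  | nil =>
    intro ds0 ds E qs prog _ _ hq hp
    exact ⟨E, qs, hq, hp, rfl, rfl, by simp [pvAInner]⟩
  | cons i is ih =>
    intro ds0 ds E qs prog hnd h hq hp
    have hi : ds.getD i [] = ds0.getD i [] := h i (List.mem_cons_self ..)
    have hnd' : is.Nodup := (List.nodup_cons.mp hnd).2
    have hni : i ∉ is := (List.nodup_cons.mp hnd).1
    cases E with
    | nil =>
      refine ⟨[], qs, hq, hp, ?_, ?_, ?_⟩ <;>
        simp [pvAInner_break, pvBInner_break]
    | cons e0 rest0 =>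
      by_cases hle : mx ≤ ((ds0.getD i []).length : Int)
      · -- day i is full: A skips it, B's open-day list drops it
        have hfil : (i :: is).filter (fun d => ((ds0.getD d []).length : Int) < mx) =
            is.filter (fun d => ((ds0.getD d []).length : Int) < mx) := by
          rw [List.filter_cons, decide_eq_false (not_lt.mpr hle), if_neg Bool.false_ne_true]
        rw [hfil, pvAInner_skip mx i is ds _ prog (by simp) (hi ▸ hle)]
        obtain ⟨E', qs', h1, h2, h3, h4, h5⟩ :=
          ih ds0 ds (e0 :: rest0) qs prog hnd' (fun d hd => h d (List.mem_cons_of_mem _ hd)) hq hp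
        refine ⟨E', qs', h1, h2, h3, h4, ?_⟩
        rw [h5]
      · -- day i is open: both sides pick the same place
        have hfil : (i :: is).filter (fun d => ((ds0.getD d []).length : Int) < mx) =
            i :: is.filter (fun d => ((ds0.getD d []).length : Int) < mx) := by
          rw [List.filter_cons, decide_eq_true (not_le.mp hle), if_pos rfl]
        have hle' : ¬ mx ≤ ((ds.getD i []).length : Int) := by rw [hi]; exact hle
        obtain ⟨j, e, hAPick, hpop, hscan, hgetD, hq', hp', hlen⟩ :=
          pvStep_corr (u := pvCatSet (ds.getD i [])) hq hp (rfl : e0 :: rest0 = e0 :: rest0)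
        have hA := pvAInner_pick mx i is ds ((e0 :: rest0).map (·.2)) prog (by simp) hle'
          e.2 (((e0 :: rest0).eraseIdx j).map (·.2)) (by rw [hAPick]; exact hpop)
        have hscan' : (match (pvBScan ((ds.map pvCatSet).getD i PySem.Set.empty) qs.items none none).1 with
            | some b => some b
            | none => (pvBScan ((ds.map pvCatSet).getD i PySem.Set.empty) qs.items none none).2) =
            some (e.1, pvGetCat e.2) := by
          rw [pvGetD_map_catSet]; exact hscan
        have hrem : ¬ (((e0 :: rest0).length : Int)) = 0 := by
          simp only [List.length_cons]
          omega
        have hB := pvBInner_pick mx i (is.filter (fun d => ((ds0.getD d []).length : Int) < mx))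
          ds (ds.map pvCatSet) qs ((e0 :: rest0).length : Int) hrem e.1 (pvGetCat e.2) hscan'
          e.1 e.2 (((e0 :: rest0).eraseIdx j).filter (fun x => pvGetCat x.2 == pvGetCat e.2))
          (by exact hgetD)
        have hus : (ds.map pvCatSet).set i
              (PySem.Set.add ((ds.map pvCatSet).getD i PySem.Set.empty) (pvGetCat e.2)) =
            (ds.set i (ds.getD i [] ++ [e.2])).map pvCatSet := by
          rw [List.map_set, pvCatSet_append, pvGetD_map_catSet]
        have hcnt : ((e0 :: rest0).length : Int) - 1 = (((e0 :: rest0).eraseIdx j).length : Int) := by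
          rw [← hlen]; push_cast; ring
        have hset : ∀ d ∈ is, (ds.set i (ds.getD i [] ++ [e.2])).getD d [] = ds0.getD d [] := by
          intro d hd
          rw [pvGetD_set_ne _ _ _ _ (fun he => hni (by rw [he]; exact hd)),
            h d (List.mem_cons_of_mem _ hd)]
        obtain ⟨E', qs', h1, h2, h3, h4, h5⟩ :=
          ih ds0 (ds.set i (ds.getD i [] ++ [e.2])) ((e0 :: rest0).eraseIdx j)
            (qs.insert (pvGetCat e.2) (((e0 :: rest0).eraseIdx j).filter
              (fun x => pvGetCat x.2 == pvGetCat e.2))) true hnd' hset hq' hp'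
        refine ⟨E', qs', h1, h2, ?_, ?_, ?_⟩
        · rw [hA]; exact h3
        · rw [hfil, hB, hus, hcnt, hA]; exact h4
        · rw [hA, h5]
          simp
          have := not_le.mp hle
          rw [List.getD_eq_getElem?_getD] at this
          exact Or.inr (Or.inl this)
  
-- the two while loops, run with the same fuel from related states, agree
theorem pvWhile_corr (mx : Int) (n : Nat) :
    ∀ (fuel : Nat) (ds : List (List (List (String × String))))
      (E : List (Int × List (String × String)))
      (qs : PySem.Dict (Option String) (List (Int × List (String × String)))),
      pvQInv qs E → E.Pairwise (fun a b => a.1 < b.1) →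
      pvBWhile mx n fuel (ds, ds.map pvCatSet, qs, (E.length : Int)) =
        pvAWhile mx n fuel ds (E.map (·.2)) := by
  intro fuel
  induction fuel with
  | zero => intro ds E qs _ _; rfl
  | succ fuel ih =>
    intro ds E qs hq hp
    cases E with
    | nil => simp [pvAWhile, pvBWhile]
    | cons e0 rest0 =>
      have hrem : ((e0 :: rest0).map (·.2)) ≠ [] := by simp
      have hremB : ¬ (((e0 :: rest0).length : Int)) = 0 := by
        simp only [List.length_cons]
        omega
      obtain ⟨E', qs', h1, h2, h3, h4, h5⟩ :=
        pvInner_corr mx (List.range n) ds ds (e0 :: rest0) qs false List.nodup_range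
          (fun _ _ => rfl) hq hp
      simp only [pvAWhile, pvBWhile, if_neg hrem, if_neg hremB]
      by_cases hod : (List.range n).filter (fun d => ((ds.getD d []).length : Int) < mx) = []
      · rw [if_pos hod]
        rw [hod] at h4
        simp only [pvBInner] at h4
        have hds : ds = (pvAInner mx (List.range n) (ds, (e0 :: rest0).map (·.2), false)).1 :=
          congrArg (fun st => st.1) h4
        have h5' : (pvAInner mx (List.range n) (ds, (e0 :: rest0).map (·.2), false)).2.2 = false := by
          rw [h5, hod]; simp
        rw [h5', if_neg Bool.false_ne_true]
        exact hds
      · rw [if_neg hod]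
        have h5' : (pvAInner mx (List.range n) (ds, (e0 :: rest0).map (·.2), false)).2.2 = true := by
          rw [h5, decide_eq_true (by simp : (e0 :: rest0) ≠ []), decide_eq_true hod]
          rfl
        rw [h4, h5', if_pos rfl, h3]
        exact ih _ E' qs' h1 h2

-- ----- the initial queue dictionary satisfies the invariant -----
theorem pvBQueues_inv (rest : List (List (String × String))) :
    pvQInv (pvBQueues rest) (PySem.List.enumerate rest) := by
  have hfold : pvBQueues rest =
      ((PySem.List.enumerate rest).map
          (fun (e : Int × List (String × String)) => (pvGetCat e.2, e))).foldl
        (fun d p => d.modify p.1 [] (· ++ [p.2])) PySem.Dict.empty := by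
    rw [pvBQueues, List.foldl_map]
  refine ⟨?_, ?_, ?_⟩
  · rw [pvBQueues]
    exact PySem.Dict.nodup_keys_foldl_modify_key _
      (fun (e : Int × List (String × String)) => pvGetCat e.2) [] (fun _ e => (· ++ [e])) _
      (by simp [PySem.Dict.keys_empty])
  · intro c
    rw [hfold, PySem.Dict.getD_foldl_modify_append, PySem.Dict.getD_empty, List.nil_append,
      List.filter_map]
    have : ((fun (p : Option String × (Int × List (String × String))) => p.1 == c) ∘
          (fun (e : Int × List (String × String)) => (pvGetCat e.2, e))) =
        (fun (e : Int × List (String × String)) => pvGetCat e.2 == c) := rfl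
    rw [this, List.map_map]
    exact List.map_id _
  · intro e he
    rw [pvBQueues, PySem.Dict.contains_iff_mem_keys,
      PySem.Dict.keys_foldl_modify_key _
        (fun (e : Int × List (String × String)) => pvGetCat e.2) [] (fun _ e => (· ++ [e]))]
    rw [PySem.Dict.keys_empty]
    have : PySem.Set.update []
          ((PySem.List.enumerate rest).map (fun (e : Int × List (String × String)) => pvGetCat e.2)) =
        PySem.Set.ofList
          ((PySem.List.enumerate rest).map (fun (e : Int × List (String × String)) => pvGetCat e.2)) := by
      rw [PySem.Set.ofList_eq_foldl]; rfl
    rw [this, PySem.Set.mem_ofList]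
    exact List.mem_map_of_mem he

-- ----- first pass -----
theorem pvAFirst_shift :
    ∀ (l : List Nat) (x : List (List (String × String)))
      (ds : List (List (List (String × String)))) (rem : List (List (String × String))),
      pvAFirst (l.map Nat.succ) (x :: ds) rem =
        (x :: (pvAFirst l ds rem).1, (pvAFirst l ds rem).2) := by
  intro l
  induction l with
  | nil => intro x ds rem; rfl
  | cons i is ih =>
    intro x ds rem
    cases rem with
    | nil => rfl
    | cons p rest =>
      simp only [List.map_cons, pvAFirst]
      rw [show ((x :: ds).set (i+1) ((x :: ds).getD (i+1) [] ++ [p])) = x :: ds.set i (ds.getD i [] ++ [p]) from rfl]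
      exact ih x _ rest

theorem pvAFirst_range :
    ∀ (n : Nat) (places : List (List (String × String))),
      pvAFirst (List.range n) (List.replicate n []) places =
        ((places.take (min n places.length)).map (fun p => [p]) ++
           List.replicate (n - min n places.length) [],
         places.drop n) := by
  intro n
  induction n with
  | zero => intro places; simp [pvAFirst]
  | succ m ih =>
    intro places
    rw [List.range_succ_eq_map, List.replicate_succ]
    cases places with
    | nil => simp [pvAFirst, List.replicate_succ]
    | cons p rest =>
      simp only [pvAFirst]
      rw [show (([] :: List.replicate m ([] : List (List (String × String)))).set 0
            (([] :: List.replicate m []).getD 0 [] ++ [p])) = [p] :: List.replicate m [] from rfl]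
      rw [pvAFirst_shift, ih rest]
      simp only [List.length_cons, List.drop_succ_cons]
      have hmin : min (m + 1) (rest.length + 1) = (min m rest.length) + 1 := by omega
      rw [hmin]
      simp [List.take_succ_cons]

theorem pvDrop_min (places : List (List (String × String))) (n : Nat) :
    places.drop n = places.drop (min n places.length) := by
  rcases le_total n places.length with h | h
  · rw [min_eq_left h]
  · rw [min_eq_right h, List.drop_eq_nil_of_le h, List.drop_length]

-- ===== VERDICT (by name: the statement is the Claim_ definition above) =====
theorem build_balanced_day_stops_py_spec : Claim_equal_build_balanced_day_stops_py := by
  unfold Claim_equal_build_balanced_day_stops_py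
  intro places days mxs _
  unfold Spec_build_balanced_day_stops_py
  by_cases hd : days ≤ 0
  · simp [build_balanced_day_stops_py, build_balanced_day_stops_py_alt, hd]
  · simp only [build_balanced_day_stops_py, build_balanced_day_stops_py_alt, if_neg hd,
      pvAFirst_range]
    rw [pvDrop_min places days.toNat]
    have hcorr := pvWhile_corr mxs days.toNat
      ((places.drop (min days.toNat places.length)).length + 1)
      ((places.take (min days.toNat places.length)).map (fun p => [p]) ++
        List.replicate (days.toNat - min days.toNat places.length) [])
      (PySem.List.enumerate (places.drop (min days.toNat places.length)))
      (pvBQueues (places.drop (min days.toNat places.length)))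
      (pvBQueues_inv _) (PySem.List.pairwise_lt_enumerate _ 0)
    rw [PySem.List.length_enumerate, PySem.List.map_snd_enumerate] at hcorr
    rw [← hcorr]
    congr 1
    simp [pvCatSet, List.map_map]
    rw [show (pvCatSet ∘ fun p => [p]) = (fun p : List (String × String) => PySem.Set.ofList [pvGetCat p]) from funext (fun p => rfl)]
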